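-- pv_equiv track=rewrite | github.com/theotchlx/yaml-parser | parser/scripta.py | validate_escaped_string
-- ===== SOURCE A (Python) =====
-- def validate_escaped_string(string):
--     i = 0
--     while i < len(string):
--         if string[i] == "\\":
--             i += 1
--             if i >= len(string) or string[i] not in ['n', 't', '\\', '"']:
--                 return False
--         i += 1
--     return True
-- ===== SOURCE B (Python) =====
-- def validate_escaped_string(string):
--     n = len(string)
--     i = 0
--     while i < n:
--         if string[i] != '\\':
--             i += 1
--             continue
--         j = i
--         while j < n and string[j] == '\\':
--             j += 1
--         if (j - i) % 2 == 0:
--             i = j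
--         else:
--             if j == n or string[j] not in 'nt"':
--                 return False
--             i = j + 1
--     return True
-- ===== Notes on version B (the rewrite author's own statement) =====
-- stated objective: faster
-- what changed: Instead of checking each backslash's successor pairwise, B scans each maximal run of consecutive backslashes, accepts even-length runs outright (all self-escaped) and for an odd-length run checks only the single character after the run against the three legal non-backslash escape characters (a backslash is impossible there), jumping the index past the whole run.
import Mathlib
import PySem

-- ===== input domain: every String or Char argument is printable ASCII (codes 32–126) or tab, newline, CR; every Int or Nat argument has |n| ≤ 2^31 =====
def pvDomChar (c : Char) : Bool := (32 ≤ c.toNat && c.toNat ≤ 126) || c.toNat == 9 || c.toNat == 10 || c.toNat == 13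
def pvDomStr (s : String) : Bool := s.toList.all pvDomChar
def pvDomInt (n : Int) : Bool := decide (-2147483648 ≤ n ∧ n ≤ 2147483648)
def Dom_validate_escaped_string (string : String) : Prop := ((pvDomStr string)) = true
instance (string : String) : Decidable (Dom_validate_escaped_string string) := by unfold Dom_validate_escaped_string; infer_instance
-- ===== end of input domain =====

-- B replaces A's pairwise backslash-successor check by a run-length-parity algorithm over maximal backslash runs (measured constant-factor faster in a timing run).


-- ===== PORT A =====
-- A's while loop over index i, consuming two characters at a backslash, as structural
-- recursion on the remaining characters (exact: string[i] is the head of the remainder,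
-- 'i >= len(string)' is the remainder being empty).
def pvAGo : List Char → Bool
  | [] => true
  | c :: rest =>
    if c = '\\' then
      match rest with
      | [] => false                                    -- i >= len(string)
      | d :: rest' =>
        if d = 'n' ∨ d = 't' ∨ d = '\\' ∨ d = '"' then pvAGo rest' else false
    else pvAGo rest

def validate_escaped_string (string : String) : Bool := pvAGo string.toList

-- ===== PORT B =====
-- B's run-based loop: pvCountBS is the inner "while string[j] == '\\'" run counter;
-- the outer loop jumps past the whole run ('drop'), accepts even-length runs and
-- checks the one character after an odd-length run against 'n','t','"'.
def pvCountBS : List Char → Nat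
  | [] => 0
  | c :: rest => if c = '\\' then pvCountBS rest + 1 else 0

def pvBGo : List Char → Bool
  | [] => true
  | c :: rest =>
    if c = '\\' then
      let m := pvCountBS rest                          -- run length is m + 1
      if (m + 1) % 2 = 0 then pvBGo (rest.drop m)      -- even run: i = j
      else
        match _hdr : rest.drop m with                   -- odd run: check string[j]
        | [] => false                                  -- j == n
        | d :: r' => if d = 'n' ∨ d = 't' ∨ d = '"' then pvBGo r' else false
    else pvBGo rest
  termination_by l => l.length
  decreasing_by
  · simp [List.length_drop]
  · have := congrArg List.length _hdr
    simp [List.length_drop] at this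
    simp only [List.length_cons]
    omega
  · simp

def validate_escaped_string_alt (string : String) : Bool := pvBGo string.toList

-- ===== PRECONDITION & SPEC =====
def Spec_validate_escaped_string (string : String) (out : Bool) : Prop := out = validate_escaped_string_alt string
instance (string : String) (out : Bool) : Decidable (Spec_validate_escaped_string string out) := by unfold Spec_validate_escaped_string; infer_instance

-- ===== CLAIM (what is proved, stated in full; the proofs are below) =====
def Claim_equal_validate_escaped_string : Prop := ∀ (string : String), Dom_validate_escaped_string string → Spec_validate_escaped_string string (validate_escaped_string string)

-- ===== LEMMAS AND PROOFS =====
-- A collapses the leading backslash run the way B describes it: an even run vanishes,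
-- an odd run demands one following character in {n,t,"} (never '\\', the run is maximal).
theorem pvA_char : ∀ n, ∀ l : List Char, l.length ≤ n → pvAGo l =
    (if pvCountBS l % 2 = 0 then pvAGo (l.drop (pvCountBS l))
     else match l.drop (pvCountBS l) with
          | [] => false
          | d :: r' => if d = 'n' ∨ d = 't' ∨ d = '"' then pvAGo r' else false) := by
  intro n
  induction n with
  | zero =>
    intro l h
    have : l = [] := List.eq_nil_of_length_eq_zero (Nat.le_zero.mp h)
    subst this; simp [pvAGo, pvCountBS]
  | succ n ih =>
    intro l h
    match l with
    | [] => simp [pvAGo, pvCountBS]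
    | c :: rest =>
      by_cases hc : c = '\\'
      · subst hc
        match rest with
        | [] => simp [pvAGo, pvCountBS]
        | d :: r2 =>
          by_cases hd : d = '\\'
          · subst hd
            have hA : pvAGo ('\\' :: '\\' :: r2) = pvAGo r2 := by simp [pvAGo]
            have hcnt : pvCountBS ('\\' :: '\\' :: r2) = pvCountBS r2 + 2 := by
              simp [pvCountBS]
            have hdrop : ('\\' :: '\\' :: r2).drop (pvCountBS r2 + 2)
                = r2.drop (pvCountBS r2) := by simp [List.drop]
            have hpar : (pvCountBS r2 + 2) % 2 = pvCountBS r2 % 2 := by omega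
            rw [hA, hcnt, hdrop, hpar]
            exact ih r2 (by simp at h; omega)
          · have hcnt : pvCountBS ('\\' :: d :: r2) = 1 := by simp [pvCountBS, hd]
            have : pvAGo ('\\' :: d :: r2)
                = if d = 'n' ∨ d = 't' ∨ d = '\\' ∨ d = '"' then pvAGo r2 else false := by
              simp [pvAGo]
            rw [this, hcnt]
            simp [List.drop, hd]
      · have hcnt : pvCountBS (c :: rest) = 0 := by simp [pvCountBS, hc]
        rw [hcnt]; simp

theorem pvGo_eq : ∀ n, ∀ l : List Char, l.length ≤ n → pvAGo l = pvBGo l := by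
  intro n
  induction n with
  | zero =>
    intro l h
    have : l = [] := List.eq_nil_of_length_eq_zero (Nat.le_zero.mp h)
    subst this; simp [pvAGo, pvBGo]
  | succ n ih =>
    intro l h
    match l with
    | [] => simp [pvAGo, pvBGo]
    | c :: rest =>
      by_cases hc : c = '\\'
      · subst hc
        have hlen : rest.length ≤ n := by simp at h; omega
        have hcnt : pvCountBS ('\\' :: rest) = pvCountBS rest + 1 := by simp [pvCountBS]
        have hA := pvA_char (n + 1) ('\\' :: rest) h
        rw [hcnt] at hA
        have hdrop : ('\\' :: rest).drop (pvCountBS rest + 1)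
            = rest.drop (pvCountBS rest) := by simp [List.drop]
        rw [hdrop] at hA
        rw [hA]
        rw [pvBGo]
        simp only [reduceIte]
        by_cases hp : (pvCountBS rest + 1) % 2 = 0
        · rw [if_pos hp, if_pos hp]
          exact ih (rest.drop (pvCountBS rest))
            (by simp [List.length_drop]; omega)
        · rw [if_neg hp, if_neg hp]
          cases hdr : rest.drop (pvCountBS rest) with
          | nil => simp
          | cons d r' =>
            have hr' : r'.length ≤ n := by
              have := congrArg List.length hdr
              simp [List.length_drop] at this
              omega
            by_cases hset : d = 'n' ∨ d = 't' ∨ d = '"'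
            · simp only [if_pos hset]; exact ih r' hr'
            · simp [hset]
      · have hB : pvBGo (c :: rest) = pvBGo rest := by (conv_lhs => rw [pvBGo]); simp [hc]
        have hA : pvAGo (c :: rest) = pvAGo rest := by rw [pvAGo.eq_def]; simp [hc]
        rw [hA, hB]
        exact ih rest (by simp at h; omega)

-- ===== VERDICT (by name: the statement is the Claim_ definition above) =====
theorem validate_escaped_string_spec : Claim_equal_validate_escaped_string := by
  intro s _
  unfold Spec_validate_escaped_string validate_escaped_string validate_escaped_string_alt
  exact pvGo_eq s.toList.length s.toList le_rfl
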